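-- pv_equiv track=rewrite | github.com/hoangdung-nguyen/rl-tien-len | game/judger.py | is_hang
-- ===== SOURCE A (Python) =====
-- def is_hang(cards):
--     """
--     Checks for 'Pairs-of-Sequences' (Double Runs).
--     Matches Java logic for pairsOf.size() >= 3 and pairsOf.get(rank) == 2
--     """
--     if len(cards) < 6 or len(cards) % 2 != 0: return False
--     ranks = sorted([c[0] for c in cards])
--     # Ensure every rank has exactly a pair
--     for i in range(0, len(ranks), 2):
--         if ranks[i] != ranks[i+1]: return False
--
--     # Ensure the unique ranks are a sequence
--     unique_ranks = sorted(list(set(ranks)))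
--     if 15 in unique_ranks: return False
--     return all(unique_ranks[i] == unique_ranks[0] + i for i in range(len(unique_ranks)))
-- ===== SOURCE B (Python) =====
-- def is_hang(cards):
--     if len(cards) < 6 or len(cards) % 2 != 0:
--         return False
--     counts = {}
--     for c in cards:
--         counts[c[0]] = counts.get(c[0], 0) + 1
--     if any(v % 2 != 0 for v in counts.values()):
--         return False
--     if 15 in counts:
--         return False
--     distinct = sorted(counts)
--     return distinct[-1] - distinct[0] == len(distinct) - 1
-- ===== Notes on version B (the rewrite author's own statement) =====
-- stated objective: alternative
-- what changed: B replaces A's sort-then-walk-adjacent-pairs check with a tabulation: it builds a per-rank count dictionary in one pass, checks every count is even, excludes 15 by a dict-key lookup, and decides consecutiveness of the distinct ranks by the closed-form span test max-min == count-1 instead of A's per-index comparison against head+i.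
import Mathlib
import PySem

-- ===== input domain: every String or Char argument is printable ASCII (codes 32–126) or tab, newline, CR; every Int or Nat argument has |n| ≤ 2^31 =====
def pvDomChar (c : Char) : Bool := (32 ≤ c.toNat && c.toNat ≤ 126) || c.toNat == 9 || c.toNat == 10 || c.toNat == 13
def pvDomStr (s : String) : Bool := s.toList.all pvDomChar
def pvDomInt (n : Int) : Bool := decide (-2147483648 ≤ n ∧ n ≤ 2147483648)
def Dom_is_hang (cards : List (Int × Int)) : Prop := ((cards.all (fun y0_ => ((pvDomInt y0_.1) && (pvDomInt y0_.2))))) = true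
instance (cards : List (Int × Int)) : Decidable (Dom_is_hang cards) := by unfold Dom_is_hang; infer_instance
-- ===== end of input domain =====

-- B tabulates per-rank counts in a dict and uses the max-min span test instead of A's
-- sort-then-adjacent-pair walk and per-index consecutiveness check (objective: alternative).

-- ===== PORT A =====
def is_hang (cards : List (Int × Int)) : Bool :=
  if cards.length < 6 ∨ cards.length % 2 ≠ 0 then false
  else
    let ranks := PySem.List.sorted (cards.map (fun c => c.1)) (fun x => x) false
    if ¬ ((PySem.List.pyRange 0 (ranks.length : Int) 2).all (fun i =>
        PySem.List.pyGet? ranks i == PySem.List.pyGet? ranks (i + 1))) then false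
    else
      let unique_ranks := PySem.List.sorted (PySem.Set.ofList ranks) (fun x => x) false
      if unique_ranks.contains 15 then false
      else (PySem.List.pyRange 0 (unique_ranks.length : Int) 1).all (fun i =>
        PySem.List.pyGet? unique_ranks i == (PySem.List.pyGet? unique_ranks 0).map (fun u0 => u0 + i))

-- ===== PORT B =====
def is_hang_alt (cards : List (Int × Int)) : Bool :=
  if cards.length < 6 ∨ cards.length % 2 ≠ 0 then false
  else
    let counts := cards.foldl (fun d c => d.insert c.1 (d.getD c.1 0 + 1))
      (PySem.Dict.empty : PySem.Dict Int Int)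
    if counts.values.any (fun v => PySem.Int.mod v 2 ≠ 0) then false
    else if counts.contains 15 then false
    else
      let distinct := PySem.List.sorted counts.keys (fun x => x) false
      -- distinct[-1] / distinct[0]: none = IndexError, unreachable here (counts nonempty)
      match PySem.List.pyGet? distinct (-1), PySem.List.pyGet? distinct 0 with
      | some hi, some lo => decide (hi - lo = (distinct.length : Int) - 1)
      | _, _ => false

-- ===== PRECONDITION & SPEC =====
def Spec_is_hang (cards : List (Int × Int)) (out : Bool) : Prop := out = is_hang_alt cards
instance (cards : List (Int × Int)) (out : Bool) : Decidable (Spec_is_hang cards out) := by unfold Spec_is_hang; infer_instance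

-- ===== CLAIM (what is proved, stated in full; the proofs are below) =====
def Claim_equal_is_hang : Prop := ∀ (cards : List (Int × Int)), Dom_is_hang cards → Spec_is_hang cards (is_hang cards)

-- ===== LEMMAS AND PROOFS =====

def pairOK : List Int → Bool
  | [] => true
  | [_] => false
  | a :: b :: t => (a == b) && pairOK t

theorem L1 (l : List Int) (h : l.length % 2 = 0) :
    ((List.range (l.length / 2)).all (fun k => l[2*k]? == l[2*k+1]?)) = pairOK l := by
  induction l using pairOK.induct with
  | case1 => simp [pairOK]
  | case2 a => simp at h
  | case3 a b t ih =>
    have ht : t.length % 2 = 0 := by simp at h; omega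
    have hdiv : (a :: b :: t).length / 2 = t.length / 2 + 1 := by simp; omega
    rw [hdiv, List.range_succ_eq_map]
    simp only [List.all_cons, List.all_map, pairOK]
    have h0 : ((a :: b :: t)[2 * 0]? == (a :: b :: t)[2 * 0 + 1]?) = (a == b) := by
      norm_num
    rw [h0, ← ih ht]
    congr 1

theorem L0 (l : List Int) (h : l.length % 2 = 0) :
    ((PySem.List.pyRange 0 (l.length : Int) 2).all (fun i =>
        PySem.List.pyGet? l i == PySem.List.pyGet? l (i + 1))) =
    ((List.range (l.length / 2)).all (fun k => l[2*k]? == l[2*k+1]?)) := by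
  rw [PySem.List.pyRange_of_pos 0 (l.length : Int) (by norm_num)]
  have hcount : (if (0:Int) < (l.length : Int) then (((l.length : Int) - 0 + 2 - 1) / 2).toNat else 0) = l.length / 2 := by
    split_ifs with h0 <;> omega
  rw [hcount, List.all_map]
  refine List.all_congr rfl (fun k => ?_)
  have e1 : (0 : Int) + 2 * (k : Int) = ((2 * k : Nat) : Int) := by push_cast; ring
  have e3 : ((2 * k : Nat) : Int) + 1 = ((2 * k + 1 : Nat) : Int) := by push_cast; ring
  simp only [Function.comp_apply, e1, e3, PySem.List.pyGet?_natCast]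

theorem L2 (l : List Int) (hs : l.Pairwise (· ≤ ·)) (h : l.length % 2 = 0) :
    (pairOK l = true ↔ ∀ k : Int, l.count k % 2 = 0) := by
  induction l using pairOK.induct with
  | case1 => simp [pairOK]
  | case2 a => simp at h
  | case3 a b t ih =>
    have ht : t.length % 2 = 0 := by simp at h; omega
    rw [List.pairwise_cons] at hs
    obtain ⟨hab, hs'⟩ := hs
    rw [List.pairwise_cons] at hs'
    obtain ⟨hbt, hst⟩ := hs'
    have hab' : a ≤ b := hab b (by simp)
    constructor
    · intro hP k
      simp only [pairOK, Bool.and_eq_true, beq_iff_eq] at hP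
      obtain ⟨hEq, hPt⟩ := hP
      have := (ih hst ht).1 hPt k
      subst hEq
      simp only [List.count_cons]
      split_ifs <;> omega
    · intro hcnt
      have haeqb : a = b := by
        by_contra hne
        have halt : a < b := lt_of_le_of_ne hab' hne
        have hnotmem : a ∉ t := by
          intro hmem
          exact absurd (lt_of_lt_of_le halt (hbt a hmem)) (lt_irrefl a)
        have hca : (a :: b :: t).count a = 1 := by
          simp [List.count_eq_zero_of_not_mem hnotmem, Ne.symm hne]
        have := hcnt a
        omega
      subst haeqb
      simp only [pairOK, beq_self_eq_true, Bool.true_and]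
      refine (ih hst ht).2 (fun k => ?_)
      have := hcnt k
      simp only [List.count_cons] at this
      split_ifs at this <;> omega

theorem gapS (u : List Int) (hs : u.Pairwise (· < ·)) :
    ∀ d i (_ : i + d < u.length), u[i]! + (d : Int) ≤ u[i+d]! := by
  intro d
  induction d with
  | zero => intro i _; simp
  | succ m ih =>
    intro i h
    have h1 : i + m < u.length := by omega
    have := ih i h1
    have hlt : u[i+m]! < u[i+m+1]! := by
      have := List.pairwise_iff_getElem.1 hs (i+m) (i+m+1) (by omega) (by omega) (by omega)
      have e1 : u[i+m]! = u[i+m] := getElem!_pos u _ (by omega)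
      have e2 : u[i+m+1]! = u[i+m+1] := getElem!_pos u _ (by omega)
      rw [e1, e2]
      exact this
    have e : i + (m+1) = i + m + 1 := by omega
    rw [e]
    push_cast
    omega

theorem propP (u : List Int) (hs : u.Pairwise (· < ·)) (hne : 0 < u.length) :
    ((∀ k, k < u.length → u[k]! = u[0]! + (k : Int)) ↔
      u[u.length - 1]! - u[0]! = (u.length : Int) - 1) := by
  constructor
  · intro h
    have := h (u.length - 1) (by omega)
    rw [this]
    have : ((u.length - 1 : Nat) : Int) = (u.length : Int) - 1 := by omega
    omega
  · intro h k hk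
    have h1 : u[0]! + ((k : Nat) : Int) ≤ u[0 + k]! := gapS u hs k 0 (by omega)
    have h2 : u[k]! + ((u.length - 1 - k : Nat) : Int) ≤ u[k + (u.length - 1 - k)]! :=
      gapS u hs (u.length - 1 - k) k (by omega)
    have e : k + (u.length - 1 - k) = u.length - 1 := by omega
    rw [e] at h2
    simp only [Nat.zero_add] at h1
    have : ((u.length - 1 - k : Nat) : Int) = (u.length : Int) - 1 - k := by omega
    omega

theorem getNeg1 (u : List Int) (hne : 0 < u.length) :
    PySem.List.pyGet? u (-1) = some u[u.length - 1]! := by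
  simp only [PySem.List.pyGet?, PySem.List.pyIdx?]
  rw [if_neg (by omega), if_pos (by omega : -(u.length : Int) ≤ -1)]
  simp only [Option.bind_some]
  have : (-(-1 : Int)).toNat = 1 := by decide
  rw [this, List.getElem?_eq_getElem (by omega), getElem!_pos u _ (by omega)]

theorem get0 (u : List Int) (hne : 0 < u.length) :
    PySem.List.pyGet? u 0 = some u[0]! := by
  simp only [PySem.List.pyGet?, PySem.List.pyIdx?]
  rw [if_pos (by omega), if_pos (by exact_mod_cast hne)]
  simp only [Int.toNat_zero, Option.bind_some]
  rw [List.getElem?_eq_getElem hne, getElem!_pos u _ hne]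

theorem L3 (u : List Int) (hs : u.Pairwise (· < ·)) (hne : 0 < u.length) :
    ((PySem.List.pyRange 0 (u.length : Int) 1).all (fun i =>
        PySem.List.pyGet? u i == (PySem.List.pyGet? u 0).map (fun u0 => u0 + i))) =
    (match PySem.List.pyGet? u (-1), PySem.List.pyGet? u 0 with
     | some hi, some lo => decide (hi - lo = (u.length : Int) - 1)
     | _, _ => false) := by
  rw [getNeg1 u hne, get0 u hne]
  simp only
  rw [Bool.eq_iff_iff]
  rw [decide_eq_true_iff, List.all_eq_true]
  have key := propP u hs hne
  constructor
  · intro h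
    refine key.1 (fun k hk => ?_) 
    have := h (k : Int) (by rw [PySem.List.mem_pyRange_one]; constructor <;> omega)
    simp only [PySem.List.pyGet?_natCast, Option.map_some] at this
    rw [List.getElem?_eq_getElem hk] at this
    rw [getElem!_pos u _ hk]
    exact_mod_cast (Option.some_inj.1 (eq_of_beq this))
  · intro h i hi
    rw [PySem.List.mem_pyRange_one] at hi
    obtain ⟨h0i, hilen⟩ := hi
    have hk : i.toNat < u.length := by omega
    have := key.2 h i.toNat hk
    have ei : ((i.toNat : Nat) : Int) = i := by omega
    simp only [Option.map_some]
    rw [← ei, PySem.List.pyGet?_natCast, List.getElem?_eq_getElem hk]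
    rw [← getElem!_pos u _ hk, this, ei]
    simp


theorem main (cards : List (Int × Int)) : is_hang cards = is_hang_alt cards := by
  by_cases hg : cards.length < 6 ∨ cards.length % 2 ≠ 0
  · simp only [is_hang, is_hang_alt, if_pos hg]
  · simp only [is_hang, is_hang_alt, if_neg hg]
    rw [not_or] at hg
    obtain ⟨h6', h2'⟩ := hg
    have h6 : 6 ≤ cards.length := by omega
    have h2 : cards.length % 2 = 0 := by omega
    set xs := cards.map (fun c => c.1) with hxs
    set ranks := PySem.List.sorted xs (fun x => x) false with hranks
    set u := PySem.List.sorted (PySem.Set.ofList ranks) (fun x => x) false with hu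
    set cnt := cards.foldl (fun d c => d.insert c.1 (d.getD c.1 0 + 1))
      (PySem.Dict.empty : PySem.Dict Int Int) with hcnt
    set dk := PySem.List.sorted cnt.keys (fun x => x) false with hdk
    have hxs_len : xs.length = cards.length := by simp [hxs]
    have hranks_len : ranks.length = cards.length := by
      rw [hranks, PySem.List.length_sorted, hxs_len]
    have hxs_ne : xs ≠ [] := by
      intro hnil; rw [hnil] at hxs_len; simp at hxs_len; omega
    have hcc : cnt = PySem.Dict.counter xs := by
      rw [hcnt, hxs, ← PySem.Dict.foldl_insert_getD_add_one_eq_counter, List.foldl_map]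
    have hmemranks : ∀ k : Int, k ∈ ranks ↔ k ∈ xs := fun k => PySem.List.mem_sorted xs _ false k
    have hcountranks : ∀ k : Int, ranks.count k = xs.count k :=
      fun k => (PySem.List.sorted_perm xs (fun x => x) false).count_eq k
    have hu_lt : u.Pairwise (· < ·) := PySem.List.sorted_ofList_pairwise_lt ranks
    have hu_mem : ∀ k : Int, k ∈ u ↔ k ∈ xs := by
      intro k
      rw [hu, PySem.List.mem_sorted, PySem.Set.mem_ofList]; exact hmemranks k
    have hu_len : 0 < u.length := by
      obtain ⟨x, hx⟩ := List.exists_mem_of_ne_nil xs hxs_ne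
      exact List.length_pos_of_mem ((hu_mem x).2 hx)
    have hdku : dk = u := by
      rw [hdk, hu, hcc, PySem.Dict.keys_counter]
      exact PySem.List.sorted_eq_sorted_of_perm _ _ _ (fun a b h => h)
        ((List.perm_ext_iff_of_nodup (PySem.Set.nodup_ofList xs) (PySem.Set.nodup_ofList ranks)).2
          (fun a => by rw [PySem.Set.mem_ofList, PySem.Set.mem_ofList]; exact (hmemranks a).symm))
    have heven : ranks.length % 2 = 0 := by rw [hranks_len]; exact h2
    have e1 : ((PySem.List.pyRange 0 (ranks.length : Int) 2).all (fun i =>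
          PySem.List.pyGet? ranks i == PySem.List.pyGet? ranks (i + 1))) =
        !(cnt.values.any fun v => decide (PySem.Int.mod v 2 ≠ 0)) := by
      rw [L0 ranks heven, L1 ranks heven, Bool.eq_iff_iff, Bool.not_eq_true']
      rw [L2 ranks (PySem.List.sorted_pairwise xs (fun x => x)) heven]
      rw [List.any_eq_false]
      constructor
      · intro h v hv
        rw [hcc] at hv
        simp only [PySem.Dict.values, PySem.Dict.items_counter, List.map_map, List.mem_map] at hv
        obtain ⟨k, hk, rfl⟩ := hv
        have hck := h k
        rw [hcountranks k] at hck
        simp only [Function.comp_apply, decide_eq_true_eq, Decidable.not_not,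
          PySem.Int.mod_eq_emod_of_pos (by norm_num : (0:Int) < 2)]
        omega
      · intro h k
        rw [hcountranks k]
        by_cases hk : k ∈ xs
        · have hv := h ((xs.count k : Int)) (by
            rw [hcc]
            simp only [PySem.Dict.values, PySem.Dict.items_counter, List.map_map, List.mem_map]
            exact ⟨k, (PySem.Set.mem_ofList xs k).2 hk, rfl⟩)
          simp only [decide_eq_true_eq, Decidable.not_not,
            PySem.Int.mod_eq_emod_of_pos (by norm_num : (0:Int) < 2)] at hv
          omega
        · rw [List.count_eq_zero_of_not_mem hk]
    have e2 : u.contains 15 = cnt.contains 15 := by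
      rw [hcc, PySem.Dict.contains_counter, Bool.eq_iff_iff, List.contains_iff_mem,
        List.contains_iff_mem]
      exact hu_mem 15
    have e3 := L3 u hu_lt hu_len
    rw [hdku, e2, e1, ← e3]
    cases hb : (cnt.values.any fun v => decide (PySem.Int.mod v 2 ≠ 0)) <;> simp

-- ===== VERDICT (by name: the statement is the Claim_ definition above) =====
theorem is_hang_spec : Claim_equal_is_hang := by
  intro cards _
  unfold Spec_is_hang
  exact main cards
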